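-- pv_equiv track=rewrite | github.com/zxgx/ccks20-dev | src/mention_extractor.py | restore_entities
-- ===== SOURCE A (Python) =====
-- def restore_entities(pred, q):
--     entities = []
--     str = ''
--     pred = pred[1:-1] # cls & sep
--     for i in range(min(len(pred), len(q))):
--         if pred[i]:
--             str += q[i]
--         else:
--             if len(str):
--                 entities.append(str)
--                 str = ''
--     if len(str):
--         entities.append(str)
--     return entities
-- ===== SOURCE B (Python) =====
-- from itertools import groupby
--
-- def restore_entities(pred, q):
--     pred = pred[1:-1]  # cls & sep
--     n = min(len(pred), len(q))
--     entities = []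
--     idx = 0
--     for key, grp in groupby(bool(p) for p in pred[:n]):
--         run = sum(1 for _ in grp)
--         if key:
--             entities.append(''.join(q[idx:idx + run]))
--         idx += run
--     return entities
-- ===== Notes on version B (the rewrite author's own statement) =====
-- stated objective: idiomatic
-- what changed: Replaced A's char-by-char buffer accumulation with flushes by an itertools.groupby split of the mask into maximal runs, emitting one joined slice of q per True-run.
import Mathlib
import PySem

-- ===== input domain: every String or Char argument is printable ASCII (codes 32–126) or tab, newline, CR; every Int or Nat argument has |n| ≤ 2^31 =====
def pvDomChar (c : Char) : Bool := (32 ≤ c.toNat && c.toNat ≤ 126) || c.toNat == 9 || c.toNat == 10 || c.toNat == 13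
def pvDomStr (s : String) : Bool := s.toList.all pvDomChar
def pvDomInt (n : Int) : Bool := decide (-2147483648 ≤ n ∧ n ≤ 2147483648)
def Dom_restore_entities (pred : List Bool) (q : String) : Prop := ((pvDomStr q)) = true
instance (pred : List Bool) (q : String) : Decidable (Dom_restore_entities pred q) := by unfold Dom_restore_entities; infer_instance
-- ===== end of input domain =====

-- B replaces A's char-by-char buffer accumulation with an itertools.groupby-style
-- split into maximal runs, emitting one entity per True-run (objective: idiomatic).

-- ===== PORT A =====
-- literal port: buffer kept as List Char (Python str concatenation, exact on ASCII);
-- indexing pred[i]/q[i] via getD — i always in range(min(len(pred), len(q))).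
def restore_entities (pred : List Bool) (q : String) : List String :=
  let pred' := PySem.List.slice pred (some 1) (some (-1))   -- pred = pred[1:-1]
  let qc := q.toList
  let n := min pred'.length qc.length
  let st := (List.range n).foldl
    (fun (st : List String × List Char) (i : Nat) =>
      if pred'.getD i false then
        (st.1, st.2 ++ [qc.getD i ' '])
      else
        if st.2.length ≠ 0 then (st.1 ++ [String.ofList st.2], []) else st)
    ([], [])
  if st.2.length ≠ 0 then st.1 ++ [String.ofList st.2] else st.1

-- ===== PORT B =====
-- groupby over the bool mask: each step consumes one maximal run (1 + takeWhile);
-- Source B's running index idx into q becomes the structurally equal remaining suffix cs.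
def pvAltGo : List Bool → List Char → List String
  | [], _ => []
  | b :: r, cs =>
    let run := 1 + (r.takeWhile (· == b)).length
    if b then
      String.ofList (cs.take run) :: pvAltGo (r.dropWhile (· == b)) (cs.drop run)
    else
      pvAltGo (r.dropWhile (· == b)) (cs.drop run)
termination_by bs _ => bs.length
decreasing_by all_goals
  exact Nat.lt_succ_of_le (List.length_dropWhile_le _ _)

def restore_entities_alt (pred : List Bool) (q : String) : List String :=
  let pred' := PySem.List.slice pred (some 1) (some (-1))   -- pred = pred[1:-1]
  let n := min pred'.length q.toList.length
  pvAltGo (pred'.take n) (q.toList.take n)   -- pred[:n]; q truncated to the n chars the runs cover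

-- ===== PRECONDITION & SPEC =====
def Spec_restore_entities (pred : List Bool) (q : String) (out : List String) : Prop := out = restore_entities_alt pred q
instance (pred : List Bool) (q : String) (out : List String) : Decidable (Spec_restore_entities pred q out) := by unfold Spec_restore_entities; infer_instance

-- ===== CLAIM (what is proved, stated in full; the proofs are below) =====
def Claim_equal_restore_entities : Prop := ∀ (pred : List Bool) (q : String), Dom_restore_entities pred q → Spec_restore_entities pred q (restore_entities pred q)

-- ===== LEMMAS AND PROOFS =====

def pvFlush (buf : List Char) : List String :=
  if buf.length ≠ 0 then [String.ofList buf] else []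

def pvStep (st : List String × List Char) (p : Bool × Char) : List String × List Char :=
  if p.1 then (st.1, st.2 ++ [p.2])
  else if st.2.length ≠ 0 then (st.1 ++ [String.ofList st.2], []) else st

-- element-wise specification both ports are reduced to
def pvRuns : List Bool → List Char → List Char → List String
  | [], _, buf => pvFlush buf
  | true :: r, c :: cs, buf => pvRuns r cs (buf ++ [c])
  | false :: r, _ :: cs, buf => pvFlush buf ++ pvRuns r cs []
  | _ :: _, [], buf => pvFlush buf

lemma pv_range_fold (n : Nat) (bs : List Bool) (cs : List Char)
    (hb : n ≤ bs.length) (hc : n ≤ cs.length) (s : List String × List Char) :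
    (List.range n).foldl (fun st i => pvStep st (bs.getD i false, cs.getD i ' ')) s
      = ((bs.take n).zip (cs.take n)).foldl pvStep s := by
  induction n with
  | zero => simp
  | succ n ih =>
    have hb' : n < bs.length := by omega
    have hc' : n < cs.length := by omega
    rw [List.range_succ, List.foldl_append, ih (by omega) (by omega)]
    rw [List.take_succ, List.take_succ]
    rw [List.zip_append (by simp [Nat.min_eq_left, hb'.le, hc'.le, List.getElem?_eq_getElem, hb', hc'])]
    simp [List.getElem?_eq_getElem, hb', hc', List.getD_eq_getElem?_getD]

lemma pv_fold_runs (l : List (Bool × Char)) (ents : List String) (buf : List Char) :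
    (if (l.foldl pvStep (ents, buf)).2.length ≠ 0
      then (l.foldl pvStep (ents, buf)).1 ++ [String.ofList (l.foldl pvStep (ents, buf)).2]
      else (l.foldl pvStep (ents, buf)).1)
      = ents ++ pvRuns (l.map Prod.fst) (l.map Prod.snd) buf := by
  induction l generalizing ents buf with
  | nil =>
    simp only [List.foldl_nil, List.map_nil, pvRuns, pvFlush]
    split <;> simp
  | cons p l ih =>
    obtain ⟨b, c⟩ := p
    cases b with
    | true =>
      have hstep : pvStep (ents, buf) (true, c) = (ents, buf ++ [c]) := by simp [pvStep]
      simp only [List.foldl_cons, hstep]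
      rw [ih ents (buf ++ [c])]
      simp [pvRuns]
    | false =>
      by_cases hbuf : buf.length ≠ 0
      · have hstep : pvStep (ents, buf) (false, c) = (ents ++ [String.ofList buf], []) := by
          simp [pvStep, hbuf]
        simp only [List.foldl_cons, hstep]
        rw [ih (ents ++ [String.ofList buf]) []]
        simp [pvRuns, pvFlush, hbuf]
      · have hb : buf = [] := by simpa using hbuf
        subst hb
        have hstep : pvStep (ents, []) (false, c) = (ents, []) := by simp [pvStep]
        simp only [List.foldl_cons, hstep]
        rw [ih ents []]
        simp [pvRuns, pvFlush]

lemma pv_runs_trues (ts : List Bool) (rest : List Bool) (cs buf : List Char)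
    (ht : ∀ b ∈ ts, b = true) (hlen : ts.length ≤ cs.length) :
    pvRuns (ts ++ rest) cs buf = pvRuns rest (cs.drop ts.length) (buf ++ cs.take ts.length) := by
  induction ts generalizing cs buf with
  | nil => simp
  | cons b ts ih =>
    cases cs with
    | nil => simp at hlen
    | cons c cs =>
      have hb : b = true := ht b (by simp)
      subst hb
      simp only [List.cons_append, pvRuns]
      rw [ih cs (buf ++ [c]) (fun x hx => ht x (by simp [hx])) (by simpa using hlen)]
      simp [List.append_assoc]

lemma pv_runs_falses (fs : List Bool) (rest : List Bool) (cs : List Char)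
    (hf : ∀ b ∈ fs, b = false) (hlen : fs.length ≤ cs.length) :
    pvRuns (fs ++ rest) cs [] = pvRuns rest (cs.drop fs.length) [] := by
  induction fs generalizing cs with
  | nil => simp
  | cons b fs ih =>
    cases cs with
    | nil => simp at hlen
    | cons c cs =>
      have hb : b = false := hf b (by simp)
      subst hb
      simp only [List.cons_append, pvRuns, pvFlush]
      rw [if_neg (by simp)]
      rw [ih cs (fun x hx => hf x (by simp [hx])) (by simpa using hlen)]
      simp

lemma pv_runs_flush (rest : List Bool) (cs buf : List Char)
    (hbuf : buf ≠ [])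
    (hrest : rest = [] ∨ ∃ r', rest = false :: r')
    (hlen : rest.length ≤ cs.length) :
    pvRuns rest cs buf = String.ofList buf :: pvRuns rest cs [] := by
  rcases hrest with h | ⟨r', h⟩ <;> subst h
  · simp [pvRuns, pvFlush, hbuf]
  · cases cs with
    | nil => simp at hlen
    | cons c cs =>
      simp [pvRuns, pvFlush, hbuf]

lemma pv_head_dropWhile {α : Type} (p : α → Bool) (l : List α) :
    l.dropWhile p = [] ∨ ∃ x r, l.dropWhile p = x :: r ∧ p x = false := by
  induction l with
  | nil => left; rfl
  | cons a l ih =>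
    by_cases h : p a
    · simpa [List.dropWhile_cons, h] using ih
    · right
      exact ⟨a, l, by simp [List.dropWhile_cons, h], by simpa using h⟩

lemma pv_altGo_eq : ∀ (m : Nat) (bs : List Bool) (cs : List Char),
    bs.length ≤ m → bs.length = cs.length → pvAltGo bs cs = pvRuns bs cs [] := by
  intro m
  induction m with
  | zero =>
    intro bs cs hm hlen
    have : bs = [] := by cases bs <;> simp_all
    subst this
    simp [pvAltGo, pvRuns, pvFlush]
  | succ m ih =>
    intro bs cs hm hlen
    cases bs with
    | nil => simp [pvAltGo, pvRuns, pvFlush]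
    | cons b r =>
      have hdecomp : b :: r = (b :: r.takeWhile (· == b)) ++ r.dropWhile (· == b) := by
        simp [List.takeWhile_append_dropWhile]
      have hrunlen : 1 + (r.takeWhile (· == b)).length ≤ cs.length := by
        have := (List.takeWhile_prefix (p := (· == b)) (l := r)).length_le
        simp at hlen; omega
      have hresthead := pv_head_dropWhile (· == b) r
      have hrestlen : (r.dropWhile (· == b)).length = (cs.drop (1 + (r.takeWhile (· == b)).length)).length := by
        have h1 : (r.takeWhile (· == b)).length + (r.dropWhile (· == b)).length = r.length := by
          rw [← List.length_append, List.takeWhile_append_dropWhile]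
        simp at hlen ⊢; omega
      have hih : pvAltGo (r.dropWhile (· == b)) (cs.drop (1 + (r.takeWhile (· == b)).length))
          = pvRuns (r.dropWhile (· == b)) (cs.drop (1 + (r.takeWhile (· == b)).length)) [] := by
        apply ih _ _ (by have := List.length_dropWhile_le (l := r) (p := (· == b)); simp at hm; omega) hrestlen
      cases b with
      | true =>
        have htrues : ∀ x ∈ true :: r.takeWhile (· == true), x = true := by
          intro x hx
          rcases List.mem_cons.mp hx with h | h
          · exact h
          · simpa using List.mem_takeWhile_imp h
        have hmain := pv_runs_trues (true :: r.takeWhile (· == true)) (r.dropWhile (· == true)) cs []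
          htrues (by simp only [List.length_cons]; omega)
        have hcs : cs ≠ [] := by
          intro h
          rw [h] at hlen; simp at hlen
        have htake_ne : cs.take (1 + (r.takeWhile (· == true)).length) ≠ [] := by
          intro h
          have h2 := congrArg List.length h
          rw [List.length_take, List.length_nil] at h2
          omega
        have hflush := pv_runs_flush (r.dropWhile (· == true))
          (cs.drop (1 + (r.takeWhile (· == true)).length))
          (cs.take (1 + (r.takeWhile (· == true)).length))
          htake_ne
          (by rcases hresthead with h | ⟨x, r', h, hx⟩
              · exact Or.inl h
              · right
                refine ⟨r', ?_⟩
                rw [h]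
                have hxf : x = false := by
                  cases x
                  · rfl
                  · simp at hx
                rw [hxf])
          (le_of_eq hrestlen)
        have hA : pvAltGo (true :: r) cs
            = String.ofList (cs.take (1 + (r.takeWhile (· == true)).length))
              :: pvAltGo (r.dropWhile (· == true)) (cs.drop (1 + (r.takeWhile (· == true)).length)) := by
          rw [pvAltGo]
          rfl
        have hcomm : (r.takeWhile (· == true)).length + 1 = 1 + (r.takeWhile (· == true)).length :=
          Nat.add_comm _ _
        rw [hA]
        conv_rhs => rw [hdecomp, hmain]
        simp only [List.nil_append, List.length_cons, hcomm]
        rw [hflush, hih]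
      | false =>
        have hA : pvAltGo (false :: r) cs
            = pvAltGo (r.dropWhile (· == false)) (cs.drop (1 + (r.takeWhile (· == false)).length)) := by
          rw [pvAltGo]
          rfl
        have hfalses : ∀ x ∈ false :: r.takeWhile (· == false), x = false := by
          intro x hx
          rcases List.mem_cons.mp hx with h | h
          · exact h
          · simpa using List.mem_takeWhile_imp h
        have hmain := pv_runs_falses (false :: r.takeWhile (· == false)) (r.dropWhile (· == false)) cs
          hfalses (by simp only [List.length_cons]; omega)
        have hcomm : (r.takeWhile (· == false)).length + 1 = 1 + (r.takeWhile (· == false)).length :=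
          Nat.add_comm _ _
        rw [hA]
        conv_rhs => rw [hdecomp, hmain]
        simp only [List.length_cons, hcomm]
        rw [hih]

-- ===== VERDICT (by name: the statement is the Claim_ definition above) =====
theorem restore_entities_spec : Claim_equal_restore_entities := by
  intro pred q _
  show restore_entities pred q = restore_entities_alt pred q
  unfold restore_entities restore_entities_alt
  simp only []
  set pred' := PySem.List.slice pred (some 1) (some (-1)) with hp
  set qc := q.toList with hq
  set n := min pred'.length qc.length with hn
  have h1 : (List.range n).foldl
      (fun (st : List String × List Char) (i : Nat) =>
        if pred'.getD i false then (st.1, st.2 ++ [qc.getD i ' '])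
        else if st.2.length ≠ 0 then (st.1 ++ [String.ofList st.2], []) else st) ([], [])
      = ((pred'.take n).zip (qc.take n)).foldl pvStep ([], []) :=
    pv_range_fold n pred' qc (Nat.min_le_left _ _) (Nat.min_le_right _ _) ([], [])
  rw [h1, pv_fold_runs]
  have hlb : (pred'.take n).length = n := by
    simp [hn]
  have hlc : (qc.take n).length = n := by
    simp [hn]
  rw [List.map_fst_zip (by rw [hlb, hlc] : (pred'.take n).length ≤ (qc.take n).length),
      List.map_snd_zip (by rw [hlb, hlc] : (qc.take n).length ≤ (pred'.take n).length)]
  rw [← pv_altGo_eq n _ _ (le_of_eq hlb) (by rw [hlb, hlc])]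
  simp
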